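-- pv_equiv track=rewrite | github.com/Eric-Robert-Lawson/OrganismCore | qualia_candidate_axioms/historical/Solen/pt8/both_composition.py | classify_both
-- ===== SOURCE A (Python) =====
-- def classify_both(voice):
--     total = len(voice)
--     # Approximate section boundaries by index
--     # s1: 6 notes, s2: 4, s3: 5, s4: 4, s5: 4
--     # Adjust per actual voice lengths
--     sections = []
--     s1_end = 6
--     s2_end = 10
--     s3_end = 15
--     s4_end = 19
--     for i in range(total):
--         if i < s1_end:
--             sections.append(1)
--         elif i < s2_end:
--             sections.append(2)
--         elif i < s3_end:
--             sections.append(3)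
--         elif i < s4_end:
--             sections.append(4)
--         else:
--             sections.append(5)
--     return sections
-- ===== SOURCE B (Python) =====
-- def classify_both(voice):
--     bounds = (6, 10, 15, 19)
--     return [1 + sum(i >= b for b in bounds) for i in range(len(voice))]
-- ===== Notes on version B (the rewrite author's own statement) =====
-- stated objective: idiomatic
-- what changed: Replaces the if/elif threshold cascade that appends to an accumulator with a comprehension computing each section as 1 plus the count of boundaries passed (branch-free table formulation).
import Mathlib
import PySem

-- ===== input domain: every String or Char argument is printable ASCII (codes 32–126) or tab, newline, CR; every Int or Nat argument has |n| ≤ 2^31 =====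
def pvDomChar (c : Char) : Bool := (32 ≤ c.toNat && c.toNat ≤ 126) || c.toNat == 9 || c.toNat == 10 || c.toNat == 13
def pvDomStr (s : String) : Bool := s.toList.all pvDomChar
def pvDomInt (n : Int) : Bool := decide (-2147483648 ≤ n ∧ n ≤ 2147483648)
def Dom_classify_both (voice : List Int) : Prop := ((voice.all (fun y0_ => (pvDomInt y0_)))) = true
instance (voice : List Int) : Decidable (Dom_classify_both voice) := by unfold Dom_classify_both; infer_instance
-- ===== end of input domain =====

-- B replaces A's if/elif cascade with "1 + number of boundaries passed" per index (idiomatic, same cost).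

-- ===== PORT A =====
def classify_both (voice : List Int) : List Int :=
  let total : Int := voice.length
  let s1_end : Int := 6
  let s2_end : Int := 10
  let s3_end : Int := 15
  let s4_end : Int := 19
  (PySem.List.pyRange 0 total 1).foldl (fun sections i =>
    if i < s1_end then sections ++ [1]
    else if i < s2_end then sections ++ [2]
    else if i < s3_end then sections ++ [3]
    else if i < s4_end then sections ++ [4]
    else sections ++ [5]) []

-- ===== PORT B =====
def classify_both_alt (voice : List Int) : List Int :=
  let bounds : List Int := [6, 10, 15, 19]
  (PySem.List.pyRange 0 (voice.length) 1).map (fun i =>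
    1 + (bounds.map (fun b => if i ≥ b then (1 : Int) else 0)).sum)

-- ===== PRECONDITION & SPEC =====
def Spec_classify_both (voice : List Int) (out : List Int) : Prop := out = classify_both_alt voice
instance (voice : List Int) (out : List Int) : Decidable (Spec_classify_both voice out) := by unfold Spec_classify_both; infer_instance

-- ===== CLAIM (what is proved, stated in full; the proofs are below) =====
def Claim_equal_classify_both : Prop := ∀ (voice : List Int), Dom_classify_both voice → Spec_classify_both voice (classify_both voice)

-- ===== LEMMAS AND PROOFS =====
theorem classify_both_cell (i : Int) :
    (if i < 6 then (1 : Int) else if i < 10 then 2 else if i < 15 then 3 else if i < 19 then 4 else 5)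
      = 1 + (([6, 10, 15, 19] : List Int).map (fun b => if i ≥ b then (1 : Int) else 0)).sum := by
  simp only [List.map, List.sum_cons, List.sum_nil]
  split_ifs <;> omega

-- ===== VERDICT (by name: the statement is the Claim_ definition above) =====
theorem classify_both_spec : Claim_equal_classify_both := by
  intro voice _
  unfold Spec_classify_both classify_both classify_both_alt
  simp only []
  rw [show (fun (sections : List Int) (i : Int) =>
      if i < 6 then sections ++ [1]
      else if i < 10 then sections ++ [2]
      else if i < 15 then sections ++ [3]
      else if i < 19 then sections ++ [4]
      else sections ++ [5])
    = (fun sections i => sections ++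
        [if i < 6 then (1 : Int) else if i < 10 then 2 else if i < 15 then 3 else if i < 19 then 4 else 5])
    from by funext s i; split_ifs <;> rfl]
  rw [PySem.List.foldl_append_singleton_eq_map]
  exact List.map_congr_left (fun i _ => classify_both_cell i)
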